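-- pv_equiv track=rewrite | github.com/Reflectrr/ReactIE-Server | ReactIE/utils.py | merge_dicts_on_all_keys_except_product
-- ===== SOURCE A (Python) =====
-- def merge_dicts_on_all_keys_except_product(dict_list):
--     """
--     This function takes a list of dictionaries as input and returns a new list with dictionaries merged
--     based on the condition that all keys, except the "product" key, have the same values.
--     """
--     merged_dicts = []
--     for dict1 in dict_list:
--         merged = False
--         for dict2 in merged_dicts:
--             # Check if both dictionaries have the same set of keys
--             if set(dict1.keys()) == set(dict2.keys()):
--                 # Check if all keys except "product" have the same values
--                 if all(dict1[k] == dict2[k] for k in dict1.keys() if k != "product"):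
--                     # Merge the dictionaries by concatenating the "product" values
--                     dict2["product"] = dict1['product'] + ', ' + dict2['product']
--                     merged = True
--                     break
--
--         if not merged:
--             merged_dicts.append(dict1)
--
--     return merged_dicts
-- ===== SOURCE B (Python) =====
-- def merge_dicts_on_all_keys_except_product(dict_list):
--     """Single pass with a hash index keyed by the sorted non-product items
--     plus whether 'product' is present; O(n*k log k) instead of A's O(n^2*k)."""
--     index = {}
--     for d in dict_list:
--         key = (tuple(sorted((k, v) for k, v in d.items() if k != "product")),
--                "product" in d)
--         e = index.get(key)
--         if e is None:
--             index[key] = d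
--         else:
--             e["product"] = d["product"] + ", " + e["product"]
--     return list(index.values())
-- ===== Notes on version B (the rewrite author's own statement) =====
-- stated objective: faster
-- what changed: A scans the whole merged list for a matching dict for every input dict (and re-compares all keys each time); B makes one pass keeping a hash index keyed by the sorted non-product items plus product-membership, so the inner scan disappears.
import Mathlib
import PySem

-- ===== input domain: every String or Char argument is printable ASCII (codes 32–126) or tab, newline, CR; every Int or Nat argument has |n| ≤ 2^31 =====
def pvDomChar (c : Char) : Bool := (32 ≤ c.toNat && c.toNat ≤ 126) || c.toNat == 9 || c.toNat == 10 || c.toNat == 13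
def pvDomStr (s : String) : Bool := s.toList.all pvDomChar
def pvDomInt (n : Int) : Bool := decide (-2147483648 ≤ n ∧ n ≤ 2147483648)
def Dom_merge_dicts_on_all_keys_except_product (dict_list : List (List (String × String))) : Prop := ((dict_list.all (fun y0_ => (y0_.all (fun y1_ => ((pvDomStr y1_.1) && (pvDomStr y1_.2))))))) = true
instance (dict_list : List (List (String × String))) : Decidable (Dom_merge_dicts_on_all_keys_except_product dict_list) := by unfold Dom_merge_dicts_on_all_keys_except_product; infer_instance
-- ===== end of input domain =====

-- B replaces A's quadratic scan of the merged list by a one-pass hash index keyed by the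
-- sorted non-"product" items (plus "product"-membership); equivalence of the RETURN values is
-- proved (both Pythons also mutate the matched input dicts' "product" entries identically).

-- ===== PORT A =====
-- dicts are PySem.Dict String String built from the assoc-list inputs.
-- 'if set(dict1.keys()) == set(dict2.keys()) and all(dict1[k] == dict2[k] for k in dict1.keys() if k != "product")'
-- dict1[k]/dict2[k] are ported as getD k "" — exact here: k ranges over dict1's keys and the
-- set-equality conjunct guards the dict2 lookup (Lean's && is short-circuit like Python's and).
def pvMatch (d1 d2 : PySem.Dict String String) : Bool :=
  PySem.Set.equal (PySem.Set.ofList d1.keys) (PySem.Set.ofList d2.keys)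
    && (d1.keys.filter (fun k => k != "product")).all
         (fun k => d1.getD k "" == d2.getD k "")

-- the inner 'for dict2 in merged_dicts: … break' loop: find the first match, update it in
-- place (dict2["product"] = dict1['product'] + ', ' + dict2['product']; the raising
-- dict1['product'] lookup of a productless dict is getD "product" "" — Pre_ excludes it);
-- none = the 'merged' flag stayed False.
def pvScan (d1 : PySem.Dict String String) :
    List (PySem.Dict String String) → Option (List (PySem.Dict String String))
  | [] => none
  | d2 :: rest =>
    if pvMatch d1 d2 then
      some ((d2.insert "product" (d1.getD "product" "" ++ ", " ++ d2.getD "product" "")) :: rest)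
    else
      match pvScan d1 rest with
      | some rest' => some (d2 :: rest')
      | none => none

def merge_dicts_on_all_keys_except_product (dict_list : List (List (String × String))) :
    List (List (String × String)) :=
  (dict_list.foldl
    (fun merged_dicts l =>
      match pvScan (PySem.Dict.mk l) merged_dicts with
      | some merged' => merged'
      | none => merged_dicts ++ [PySem.Dict.mk l])
    []).map PySem.Dict.items

-- ===== PORT B =====
-- key = (tuple(sorted((k, v) for k, v in d.items() if k != "product")), "product" in d);
-- Python's sort on (str, str) tuples is the lexicographic order, i.e. sorted with key toLex.
def pvKey (d : PySem.Dict String String) : List (String × String) × Bool :=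
  (PySem.List.sorted (d.items.filter (fun p => p.1 != "product")) (fun p => toLex p),
   d.contains "product")

def merge_dicts_on_all_keys_except_product_alt (dict_list : List (List (String × String))) :
    List (List (String × String)) :=
  ((dict_list.foldl
    (fun (index : PySem.Dict (List (String × String) × Bool) (PySem.Dict String String)) l =>
      let d := PySem.Dict.mk l
      let key := pvKey d
      match index.get? key with
      | none => index.insert key d
      | some e => index.insert key
          (e.insert "product" (d.getD "product" "" ++ ", " ++ e.getD "product" "")))
    PySem.Dict.empty).values).map PySem.Dict.items

-- ===== PRECONDITION & SPEC =====
-- two dicts (as assoc lists) are in the same merge class: equal key sets and equal values on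
-- every non-"product" key (a closed-form shape condition on the input, used only by Pre_)
def pvSameClass (l1 l2 : List (String × String)) : Prop :=
  (∀ k ∈ l1.map Prod.fst, k ∈ l2.map Prod.fst) ∧
  (∀ k ∈ l2.map Prod.fst, k ∈ l1.map Prod.fst) ∧
  (∀ p ∈ l1, p.1 ≠ "product" → p ∈ l2)

-- Pre_ excludes (a) assoc lists with duplicate keys, which no Python dict can denote (the
-- assoc list is the image of a dict, so distinct keys are its representation invariant), and
-- (b) inputs holding two same-class dicts that lack the "product" key: there Python A raises
-- KeyError on dict1['product'] (and B raises the same KeyError).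
def Pre_merge_dicts_on_all_keys_except_product (dict_list : List (List (String × String))) : Prop :=
  (∀ l ∈ dict_list, (l.map Prod.fst).Nodup) ∧
  List.Pairwise
    (fun l1 l2 => pvSameClass l1 l2 →
      ("product" ∈ l1.map Prod.fst ∧ "product" ∈ l2.map Prod.fst))
    dict_list
instance (dict_list : List (List (String × String))) : Decidable (Pre_merge_dicts_on_all_keys_except_product dict_list) := by unfold Pre_merge_dicts_on_all_keys_except_product; unfold pvSameClass; infer_instance

def pvWitness_merge_dicts_on_all_keys_except_product : (List (List (String × String))) :=
  [[("product", "a"), ("x", "1")], [("product", "b"), ("x", "1")], [("y", "2")]]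

def Spec_merge_dicts_on_all_keys_except_product (dict_list : List (List (String × String))) (out : List (List (String × String))) : Prop := out = merge_dicts_on_all_keys_except_product_alt dict_list
instance (dict_list : List (List (String × String))) (out : List (List (String × String))) : Decidable (Spec_merge_dicts_on_all_keys_except_product dict_list out) := by unfold Spec_merge_dicts_on_all_keys_except_product; infer_instance

-- ===== CLAIM (what is proved, stated in full; the proofs are below) =====
def Claim_equal_merge_dicts_on_all_keys_except_product : Prop := ∀ (dict_list : List (List (String × String))), Dom_merge_dicts_on_all_keys_except_product dict_list → Pre_merge_dicts_on_all_keys_except_product dict_list → Spec_merge_dicts_on_all_keys_except_product dict_list (merge_dicts_on_all_keys_except_product dict_list)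

-- ===== LEMMAS AND PROOFS =====

-- membership in the non-"product" items
theorem pv_np_mem (d : PySem.Dict String String) (p : String × String) :
    p ∈ d.items.filter (fun p => p.1 != "product") ↔ p ∈ d.items ∧ p.1 ≠ "product" := by
  simp [List.mem_filter, bne_iff_ne]

theorem pv_np_nodup (d : PySem.Dict String String) (hd : d.keys.Nodup) :
    (d.items.filter (fun p => p.1 != "product")).Nodup :=
  (List.Nodup.of_map Prod.fst hd).filter _

-- two dicts with distinct keys have the same pvKey iff they have the same key set and agree
-- on every non-"product" item
theorem pv_key_eq_iff (d1 d2 : PySem.Dict String String)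
    (h1 : d1.keys.Nodup) (h2 : d2.keys.Nodup) :
    pvKey d1 = pvKey d2 ↔
      ((∀ k ∈ d1.keys, k ∈ d2.keys) ∧ (∀ k ∈ d2.keys, k ∈ d1.keys) ∧
       (∀ p ∈ d1.items, p.1 ≠ "product" → p ∈ d2.items)) := by
  have hnp1 := pv_np_nodup d1 h1
  have hnp2 := pv_np_nodup d2 h2
  have hperm_iff :
      (PySem.List.sorted (d1.items.filter (fun p => p.1 != "product")) (fun p => toLex p)
        = PySem.List.sorted (d2.items.filter (fun p => p.1 != "product")) (fun p => toLex p))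
      ↔ ∀ p, p ∈ d1.items.filter (fun p => p.1 != "product")
            ↔ p ∈ d2.items.filter (fun p => p.1 != "product") := by
    rw [← List.perm_ext_iff_of_nodup hnp1 hnp2]
    constructor
    · intro h
      exact ((PySem.List.sorted_perm _ (fun p => toLex p) false).symm.trans
        (h ▸ PySem.List.sorted_perm _ (fun p => toLex p) false))
    · exact fun h => PySem.List.sorted_eq_sorted_of_perm _ _ _ toLex.injective h
  constructor
  · intro h
    have hs : PySem.List.sorted (d1.items.filter (fun p => p.1 != "product")) (fun p => toLex p)
        = PySem.List.sorted (d2.items.filter (fun p => p.1 != "product")) (fun p => toLex p) :=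
      congrArg Prod.fst h
    have hc : d1.contains "product" = d2.contains "product" := congrArg Prod.snd h
    have hmem := hperm_iff.mp hs
    have H3 : ∀ p ∈ d1.items, p.1 ≠ "product" → p ∈ d2.items := by
      intro p hp hne
      exact ((pv_np_mem d2 p).mp ((hmem p).mp ((pv_np_mem d1 p).mpr ⟨hp, hne⟩))).1
    have H3' : ∀ p ∈ d2.items, p.1 ≠ "product" → p ∈ d1.items := by
      intro p hp hne
      exact ((pv_np_mem d1 p).mp ((hmem p).mpr ((pv_np_mem d2 p).mpr ⟨hp, hne⟩))).1
    refine ⟨?_, ?_, H3⟩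
    · intro k hk
      obtain ⟨p, hp, hpk⟩ := List.mem_map.mp hk
      by_cases hkp : k = "product"
      · have hk1 : d1.contains "product" = true := by
          rw [← hkp]
          exact (PySem.Dict.contains_iff_mem_keys d1 k).mpr hk
        rw [hkp]
        exact (PySem.Dict.contains_iff_mem_keys d2 "product").mp (hc ▸ hk1)
      · rw [← hpk]
        exact PySem.Dict.mem_keys_of_mem_items d2 (H3 p hp (hpk ▸ hkp))
    · intro k hk
      obtain ⟨p, hp, hpk⟩ := List.mem_map.mp hk
      by_cases hkp : k = "product"
      · have hk2 : d2.contains "product" = true := by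
          rw [← hkp]
          exact (PySem.Dict.contains_iff_mem_keys d2 k).mpr hk
        rw [hkp]
        exact (PySem.Dict.contains_iff_mem_keys d1 "product").mp (hc.symm ▸ hk2)
      · rw [← hpk]
        exact PySem.Dict.mem_keys_of_mem_items d1 (H3' p hp (hpk ▸ hkp))
  · rintro ⟨H1, H2, H3⟩
    have hmem : ∀ p, p ∈ d1.items.filter (fun p => p.1 != "product")
        ↔ p ∈ d2.items.filter (fun p => p.1 != "product") := by
      intro p
      rw [pv_np_mem, pv_np_mem]
      constructor
      · rintro ⟨hp, hne⟩; exact ⟨H3 p hp hne, hne⟩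
      · rintro ⟨hp, hne⟩
        have hk2 : p.1 ∈ d1.keys := H2 p.1 (PySem.Dict.mem_keys_of_mem_items d2 hp)
        obtain ⟨q, hq, hqk⟩ := List.mem_map.mp hk2
        have hq2 : q ∈ d2.items := H3 q hq (hqk ▸ hne)
        have e1 : d2.get? p.1 = some p.2 :=
          PySem.Dict.get?_of_mem_items d2 (show (p.1, p.2) ∈ d2.items by simpa using hp) h2
        have e2 : d2.get? q.1 = some q.2 :=
          PySem.Dict.get?_of_mem_items d2 (show (q.1, q.2) ∈ d2.items by simpa using hq2) h2
        rw [hqk, e1] at e2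
        have hq2eq : q.2 = p.2 := (Option.some.inj e2).symm
        have hqp : q = p := Prod.ext hqk hq2eq
        exact ⟨hqp ▸ hq, hne⟩
    refine Prod.ext ?_ ?_
    · exact hperm_iff.mpr hmem
    · show d1.contains "product" = d2.contains "product"
      rw [PySem.Dict.contains_eq_decide_mem_keys, PySem.Dict.contains_eq_decide_mem_keys]
      exact decide_eq_decide.mpr ⟨H1 "product", H2 "product"⟩

-- A's match test computes key equality of B's index keys (on dicts with distinct keys)
theorem pvMatch_eq_key (d1 d2 : PySem.Dict String String)
    (h1 : d1.keys.Nodup) (h2 : d2.keys.Nodup) :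
    pvMatch d1 d2 = decide (pvKey d1 = pvKey d2) := by
  have hiff : pvMatch d1 d2 = true ↔ pvKey d1 = pvKey d2 := by
    rw [pv_key_eq_iff d1 d2 h1 h2]
    unfold pvMatch
    rw [Bool.and_eq_true]
    constructor
    · rintro ⟨hset, hall⟩
      rw [PySem.Set.equal_iff] at hset
      have hmem : ∀ k, k ∈ d1.keys ↔ k ∈ d2.keys := by
        intro k
        rw [← PySem.Set.mem_ofList d1.keys k, ← PySem.Set.mem_ofList d2.keys k]
        exact hset k
      have hval : ∀ k ∈ d1.keys, k ≠ "product" → d1.getD k "" = d2.getD k "" := by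
        intro k hk hne
        have hkf : k ∈ d1.keys.filter (fun k => k != "product") :=
          List.mem_filter.mpr ⟨hk, bne_iff_ne.mpr hne⟩
        exact beq_iff_eq.mp (List.all_eq_true.mp hall k hkf)
      refine ⟨fun k hk => (hmem k).mp hk, fun k hk => (hmem k).mpr hk, ?_⟩
      intro p hp hne
      have hk1 : p.1 ∈ d1.keys := PySem.Dict.mem_keys_of_mem_items d1 hp
      have hg1 : d1.getD p.1 "" = p.2 := PySem.Dict.getD_of_mem_items d1 hp h1 ""
      have hg2 : d2.getD p.1 "" = p.2 := (hval p.1 hk1 hne) ▸ hg1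
      have hk2 : p.1 ∈ d2.keys := (hmem p.1).mp hk1
      cases hg : d2.get? p.1 with
      | none =>
        exact absurd ((PySem.Dict.get?_eq_none_iff_not_mem_keys d2 p.1).mp hg) (by simp [hk2])
      | some w =>
        have hw : d2.getD p.1 "" = w := PySem.Dict.getD_of_get?_eq_some d2 "" hg
        have hwp : w = p.2 := by rw [← hw, hg2]
        have : d2.get? p.1 = some p.2 := hwp ▸ hg
        have := (PySem.Dict.get?_eq_some_iff_mem_items d2 p.1 p.2 h2).mp this
        simpa using this
    · rintro ⟨H1, H2, H3⟩
      constructor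
      · rw [PySem.Set.equal_iff]
        intro k
        rw [PySem.Set.mem_ofList, PySem.Set.mem_ofList]
        exact ⟨H1 k, H2 k⟩
      · rw [List.all_eq_true]
        intro k hk
        obtain ⟨hk1, hkne⟩ := List.mem_filter.mp hk
        have hne : k ≠ "product" := bne_iff_ne.mp hkne
        obtain ⟨p, hp, hpk⟩ := List.mem_map.mp hk1
        have hp2 : p ∈ d2.items := H3 p hp (hpk ▸ hne)
        rw [← hpk, PySem.Dict.getD_of_mem_items d1 hp h1 "",
            PySem.Dict.getD_of_mem_items d2 hp2 h2 ""]
        exact beq_self_eq_true _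
  cases hm : pvMatch d1 d2
  · have hne : pvKey d1 ≠ pvKey d2 := fun h => by
      rw [hm] at hiff
      exact absurd (hiff.mpr h) (by simp)
    rw [decide_eq_false hne]
  · rw [decide_eq_true (hiff.mp hm)]

theorem pv_filter_map (s : String) (l : List (String × String)) :
    (l.map (fun p => if (p.1 == "product") = true then ("product", s) else p)).filter
      (fun p => p.1 != "product")
    = l.filter (fun p => p.1 != "product") := by
  induction l with
  | nil => rfl
  | cons p t ih =>
    rw [List.map_cons]
    by_cases h : p.1 = "product"
    · rw [if_pos (by simp [h]), List.filter_cons, List.filter_cons]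
      rw [show ((("product", s) : String × String).1 != "product") = false by simp,
          show (p.1 != "product") = false by simp [h]]
      exact ih
    · rw [if_neg (by simp [h]), List.filter_cons, List.filter_cons,
          show (p.1 != "product") = true by simp [h]]
      simp only [ih]

-- overwriting the "product" entry of a dict that has one does not change its index key
theorem pvKey_insert_product (e : PySem.Dict String String) (s : String)
    (hep : e.contains "product" = true) :
    pvKey (e.insert "product" s) = pvKey e := by
  unfold pvKey
  rw [PySem.Dict.items_insert_of_contains e s hep, pv_filter_map,
      PySem.Dict.contains_insert_self, hep]

-- A's inner scan over the index's values, expressed by B's index lookup/overwrite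
theorem pv_scan_insert (d : PySem.Dict String String) (hd : d.keys.Nodup) :
    ∀ (ps : List ((List (String × String) × Bool) × PySem.Dict String String)),
    (∀ p ∈ ps, p.1 = pvKey p.2 ∧ p.2.keys.Nodup) → (ps.map Prod.fst).Nodup →
    pvScan d (ps.map Prod.snd)
      = ((PySem.Dict.mk ps).get? (pvKey d)).map
          (fun e => ((PySem.Dict.mk ps).insert (pvKey d)
            (e.insert "product" (d.getD "product" "" ++ ", " ++ e.getD "product" ""))).values) := by
  intro ps
  induction ps with
  | nil => intro _ _; rfl
  | cons q t ih =>
    obtain ⟨k2, e2⟩ := q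
    intro hps hnodup
    have hk2 : k2 = pvKey e2 := (hps (k2, e2) List.mem_cons_self).1
    have he2 : e2.keys.Nodup := (hps (k2, e2) List.mem_cons_self).2
    have hmatch : pvMatch d e2 = decide (pvKey d = pvKey e2) := pvMatch_eq_key d e2 hd he2
    have hvals : ∀ dd : PySem.Dict (List (String × String) × Bool) (PySem.Dict String String),
        dd.values = dd.items.map Prod.snd := fun _ => rfl
    rw [List.map_cons]
    by_cases hk : pvKey d = k2
    · have hmt : pvMatch d e2 = true := by
        rw [hmatch]; exact decide_eq_true (hk.trans hk2)
      have hg : (PySem.Dict.mk ((k2, e2) :: t)).get? (pvKey d) = some e2 := by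
        rw [PySem.Dict.get?_mk_cons, if_pos (by simp [hk])]
      rw [show pvScan d (e2 :: List.map Prod.snd t)
            = some ((e2.insert "product" (d.getD "product" "" ++ ", " ++ e2.getD "product" ""))
                :: List.map Prod.snd t) by simp [pvScan, hmt]]
      rw [hg, Option.map_some]
      congr 1
      have hcont : (PySem.Dict.mk ((k2, e2) :: t)).contains (pvKey d) = true := by
        rw [PySem.Dict.contains_eq_isSome_get?, hg]; rfl
      rw [hvals, PySem.Dict.items_insert_of_contains _ _ hcont, List.map_cons, List.map_cons]
      have hhead : (if ((k2, e2).1 == pvKey d) = true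
          then (pvKey d, e2.insert "product" (d.getD "product" "" ++ ", " ++ e2.getD "product" ""))
          else (k2, e2))
          = (pvKey d, e2.insert "product" (d.getD "product" "" ++ ", " ++ e2.getD "product" "")) :=
        if_pos (by simp [hk])
      rw [hhead]
      have htail : t.map (fun p => if (p.1 == pvKey d) = true
          then (pvKey d, e2.insert "product" (d.getD "product" "" ++ ", " ++ e2.getD "product" ""))
          else p) = t := by
        have hcongr : ∀ p ∈ t, (if (p.1 == pvKey d) = true
            then (pvKey d, e2.insert "product" (d.getD "product" "" ++ ", " ++ e2.getD "product" ""))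
            else p) = p := by
          intro p hp
          have hmemk : p.1 ∈ t.map Prod.fst := List.mem_map_of_mem hp
          have hne : p.1 ≠ pvKey d := by
            intro hcontra
            exact (List.nodup_cons.mp hnodup).1 (by rw [← hk, ← hcontra]; exact hmemk)
          exact if_neg (by simp [hne])
        exact (List.map_congr_left hcongr).trans (List.map_id t)
      rw [htail]
    · have hmf : pvMatch d e2 = false := by
        rw [hmatch]; exact decide_eq_false (fun h => hk (h.trans hk2.symm))
      have hih := ih (fun p hp => hps p (List.mem_cons_of_mem _ hp)) (List.nodup_cons.mp hnodup).2
      have hbne : ((k2, e2).1 == pvKey d) = false := by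
        simp only [beq_eq_false_iff_ne]; exact fun h => hk h.symm
      have hg : (PySem.Dict.mk ((k2, e2) :: t)).get? (pvKey d)
          = (PySem.Dict.mk t).get? (pvKey d) := by
        rw [PySem.Dict.get?_mk_cons, if_neg (by simp [hbne])]
      rw [hg]
      rw [show pvScan d (e2 :: List.map Prod.snd t)
            = (pvScan d (List.map Prod.snd t)).map (fun r => e2 :: r) by
        simp only [pvScan, hmf, Bool.false_eq_true, if_false]
        cases pvScan d (List.map Prod.snd t) <;> rfl]
      rw [hih]
      cases hgt : (PySem.Dict.mk t).get? (pvKey d) with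
      | none => rfl
      | some e =>
        simp only [Option.map_some]
        congr 1
        have hcontt : (PySem.Dict.mk t).contains (pvKey d) = true := by
          rw [PySem.Dict.contains_eq_isSome_get?, hgt]; rfl
        have hcontc : (PySem.Dict.mk ((k2, e2) :: t)).contains (pvKey d) = true := by
          rw [PySem.Dict.contains_eq_isSome_get?, hg, hgt]; rfl
        rw [hvals, hvals, PySem.Dict.items_insert_of_contains _ _ hcontt,
            PySem.Dict.items_insert_of_contains _ _ hcontc, List.map_cons, List.map_cons,
            if_neg (by simp [hbne])]

theorem pv_main (rest : List (List (String × String))) :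
    ∀ (idx : PySem.Dict (List (String × String) × Bool) (PySem.Dict String String)),
    (∀ l ∈ rest, (l.map Prod.fst).Nodup) →
    List.Pairwise (fun l1 l2 => pvKey (PySem.Dict.mk l1) = pvKey (PySem.Dict.mk l2) →
        (PySem.Dict.mk l1).contains "product" = true) rest →
    (∀ p ∈ idx.items, p.1 = pvKey p.2 ∧ p.2.keys.Nodup) →
    idx.keys.Nodup →
    (∀ p ∈ idx.items, ∀ l ∈ rest, pvKey (PySem.Dict.mk l) = pvKey p.2 →
        p.2.contains "product" = true) →
    rest.foldl (fun merged_dicts l =>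
        match pvScan (PySem.Dict.mk l) merged_dicts with
        | some merged' => merged'
        | none => merged_dicts ++ [PySem.Dict.mk l]) idx.values
      = (rest.foldl (fun index l =>
          let d := PySem.Dict.mk l
          let key := pvKey d
          match index.get? key with
          | none => index.insert key d
          | some e => index.insert key
              (e.insert "product" (d.getD "product" "" ++ ", " ++ e.getD "product" ""))) idx).values := by
  induction rest with
  | nil => intro idx _ _ _ _ _; rfl
  | cons l t ih =>
    intro idx hrN hrP hitems hkeys hcross
    rw [List.foldl_cons, List.foldl_cons]
    have hdnodup : ((PySem.Dict.mk l).keys).Nodup := hrN l List.mem_cons_self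
    have hscan' : pvScan (PySem.Dict.mk l) idx.values
        = (idx.get? (pvKey (PySem.Dict.mk l))).map
            (fun e => (idx.insert (pvKey (PySem.Dict.mk l))
              (e.insert "product" ((PySem.Dict.mk l).getD "product" "" ++ ", " ++ e.getD "product" ""))).values) :=
      pv_scan_insert (PySem.Dict.mk l) hdnodup idx.items hitems hkeys
    cases hg : idx.get? (pvKey (PySem.Dict.mk l)) with
    | none =>
      have hsc : pvScan (PySem.Dict.mk l) idx.values = none := by rw [hscan', hg]; rfl
      have hnc : idx.contains (pvKey (PySem.Dict.mk l)) = false := by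
        rw [PySem.Dict.contains_eq_isSome_get?, hg]; rfl
      have hitems' : (idx.insert (pvKey (PySem.Dict.mk l)) (PySem.Dict.mk l)).items
          = idx.items ++ [(pvKey (PySem.Dict.mk l), PySem.Dict.mk l)] :=
        PySem.Dict.items_insert_of_not_contains _ _ hnc
      have hstepA : (match pvScan (PySem.Dict.mk l) idx.values with
          | some merged' => merged'
          | none => idx.values ++ [PySem.Dict.mk l]) = idx.values ++ [PySem.Dict.mk l] := by
        rw [hsc]
      have hstepB : (let d := PySem.Dict.mk l
          let key := pvKey d
          match idx.get? key with
          | none => idx.insert key d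
          | some e => idx.insert key
              (e.insert "product" (d.getD "product" "" ++ ", " ++ e.getD "product" "")))
          = idx.insert (pvKey (PySem.Dict.mk l)) (PySem.Dict.mk l) := by
        simp only
        rw [hg]
      rw [hstepA, hstepB]
      have hveq : (idx.insert (pvKey (PySem.Dict.mk l)) (PySem.Dict.mk l)).values
          = idx.values ++ [PySem.Dict.mk l] := by
        show (idx.insert (pvKey (PySem.Dict.mk l)) (PySem.Dict.mk l)).items.map Prod.snd = _
        rw [hitems', List.map_append]
        rfl
      rw [← hveq]
      refine ih (idx.insert (pvKey (PySem.Dict.mk l)) (PySem.Dict.mk l))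
        (fun l' hl' => hrN l' (List.mem_cons_of_mem _ hl'))
        (List.pairwise_cons.mp hrP).2 ?_ (PySem.Dict.nodup_keys_insert _ _ _ hkeys) ?_
      · intro p hp
        rw [hitems'] at hp
        rcases List.mem_append.mp hp with hold | hnew
        · exact hitems p hold
        · rw [List.mem_singleton.mp hnew]
          exact ⟨rfl, hdnodup⟩
      · intro p hp l' hl' hkeq
        rw [hitems'] at hp
        rcases List.mem_append.mp hp with hold | hnew
        · exact hcross p hold l' (List.mem_cons_of_mem _ hl') hkeq
        · rw [List.mem_singleton.mp hnew] at hkeq ⊢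
          exact (List.pairwise_cons.mp hrP).1 l' hl' hkeq.symm
    | some e =>
      have hsc : pvScan (PySem.Dict.mk l) idx.values
          = some ((idx.insert (pvKey (PySem.Dict.mk l))
              (e.insert "product" ((PySem.Dict.mk l).getD "product" "" ++ ", " ++ e.getD "product" ""))).values) := by
        rw [hscan', hg]; rfl
      have hmemi : (pvKey (PySem.Dict.mk l), e) ∈ idx.items :=
        (PySem.Dict.get?_eq_some_iff_mem_items idx _ e hkeys).mp hg
      have hke : pvKey (PySem.Dict.mk l) = pvKey e := (hitems _ hmemi).1
      have he : e.keys.Nodup := (hitems _ hmemi).2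
      have hep : e.contains "product" = true :=
        hcross (pvKey (PySem.Dict.mk l), e) hmemi l List.mem_cons_self hke
      have hcont : idx.contains (pvKey (PySem.Dict.mk l)) = true := by
        rw [PySem.Dict.contains_eq_isSome_get?, hg]; rfl
      have hitems' : (idx.insert (pvKey (PySem.Dict.mk l))
            (e.insert "product" ((PySem.Dict.mk l).getD "product" "" ++ ", " ++ e.getD "product" ""))).items
          = idx.items.map (fun p => if (p.1 == pvKey (PySem.Dict.mk l)) = true
              then (pvKey (PySem.Dict.mk l),
                e.insert "product" ((PySem.Dict.mk l).getD "product" "" ++ ", " ++ e.getD "product" ""))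
              else p) :=
        PySem.Dict.items_insert_of_contains _ _ hcont
      have hstepA : (match pvScan (PySem.Dict.mk l) idx.values with
          | some merged' => merged'
          | none => idx.values ++ [PySem.Dict.mk l])
          = (idx.insert (pvKey (PySem.Dict.mk l))
              (e.insert "product" ((PySem.Dict.mk l).getD "product" "" ++ ", " ++ e.getD "product" ""))).values := by
        rw [hsc]
      have hstepB : (let d := PySem.Dict.mk l
          let key := pvKey d
          match idx.get? key with
          | none => idx.insert key d
          | some e => idx.insert key
              (e.insert "product" (d.getD "product" "" ++ ", " ++ e.getD "product" "")))
          = idx.insert (pvKey (PySem.Dict.mk l))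
              (e.insert "product" ((PySem.Dict.mk l).getD "product" "" ++ ", " ++ e.getD "product" "")) := by
        simp only
        rw [hg]
      rw [hstepA, hstepB]
      refine ih _
        (fun l' hl' => hrN l' (List.mem_cons_of_mem _ hl'))
        (List.pairwise_cons.mp hrP).2 ?_ ?_ ?_
      · intro p hp
        rw [hitems'] at hp
        obtain ⟨q, hq, hfq⟩ := List.mem_map.mp hp
        by_cases hq1 : (q.1 == pvKey (PySem.Dict.mk l)) = true
        · rw [if_pos hq1] at hfq
          rw [← hfq]
          refine ⟨?_, PySem.Dict.nodup_keys_insert _ _ _ he⟩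
          show pvKey (PySem.Dict.mk l) = pvKey (e.insert "product" _)
          rw [pvKey_insert_product e _ hep]
          exact hke
        · rw [if_neg hq1] at hfq
          rw [← hfq]
          exact hitems q hq
      · rw [PySem.Dict.keys_insert_of_contains _ _ hcont]
        exact hkeys
      · intro p hp l' hl' hkeq
        rw [hitems'] at hp
        obtain ⟨q, hq, hfq⟩ := List.mem_map.mp hp
        by_cases hq1 : (q.1 == pvKey (PySem.Dict.mk l)) = true
        · rw [if_pos hq1] at hfq
          rw [← hfq]
          exact PySem.Dict.contains_insert_self _ _ _
        · rw [if_neg hq1] at hfq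
          rw [← hfq]
          rw [← hfq] at hkeq
          exact hcross q hq l' (List.mem_cons_of_mem _ hl') hkeq

-- ===== VERDICT (by name: the statement is the Claim_ definition above) =====
theorem merge_dicts_on_all_keys_except_product_spec : Claim_equal_merge_dicts_on_all_keys_except_product := by
  intro dict_list hdom hpre
  obtain ⟨hnodup, hpair⟩ := hpre
  unfold Spec_merge_dicts_on_all_keys_except_product
  unfold merge_dicts_on_all_keys_except_product merge_dicts_on_all_keys_except_product_alt
  refine congrArg (fun xs => List.map PySem.Dict.items xs) ?_
  have hP : List.Pairwise (fun l1 l2 => pvKey (PySem.Dict.mk l1) = pvKey (PySem.Dict.mk l2) →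
      (PySem.Dict.mk l1).contains "product" = true) dict_list := by
    refine List.Pairwise.imp_of_mem ?_ hpair
    intro l1 l2 h1 h2 hrel hkeq
    have hn1 : ((PySem.Dict.mk l1).keys).Nodup := hnodup l1 h1
    have hn2 : ((PySem.Dict.mk l2).keys).Nodup := hnodup l2 h2
    have hsc := (pv_key_eq_iff (PySem.Dict.mk l1) (PySem.Dict.mk l2) hn1 hn2).mp hkeq
    have hcls : pvSameClass l1 l2 := ⟨hsc.1, hsc.2.1, hsc.2.2⟩
    exact (PySem.Dict.contains_iff_mem_keys (PySem.Dict.mk l1) "product").mpr (hrel hcls).1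
  exact pv_main dict_list PySem.Dict.empty hnodup hP
    (fun p hp => absurd hp (by simp [PySem.Dict.empty]))
    PySem.Dict.nodup_keys_empty
    (fun p hp => absurd hp (by simp [PySem.Dict.empty]))
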